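-- pv_equiv track=rewrite | github.com/Anjali-Mishra05/Arka-AlgoForge26 | Pravaha/backend/routers/admin/proposals.py | _extract_reasons_from_questions
-- ===== SOURCE A (Python) =====
-- def _extract_reasons_from_questions(questions: list[str], limit: int = 5) -> list[str]:
--     reasons = []
--     for question in questions:
--         lowered = question.lower()
--         if any(term in lowered for term in ["price", "cost", "budget", "fee"]):
--             reasons.append("Buyer is pushing for pricing clarity and value justification.")
--         elif any(term in lowered for term in ["timeline", "time", "launch", "deadline"]):
--             reasons.append("Buyer wants a more concrete implementation timeline.")
--         elif any(term in lowered for term in ["integrat", "crm", "api", "hubspot", "salesforce"]):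
--             reasons.append("Buyer needs clearer integration details.")
--         elif any(term in lowered for term in ["security", "privacy", "compliance", "gdpr", "dpdp"]):
--             reasons.append("Buyer wants stronger security and compliance language.")
--         elif any(term in lowered for term in ["onboard", "setup", "train"]):
--             reasons.append("Buyer needs a clearer onboarding and adoption path.")
--         elif any(term in lowered for term in ["support", "help", "success", "sla"]):
--             reasons.append("Buyer is looking for support coverage and escalation clarity.")
--         else:
--             reasons.append("Buyer question suggests the section should be more specific and outcome-focused.")
--     deduped = []
--     seen = set()
--     for reason in reasons:
--         if reason not in seen:
--             deduped.append(reason)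
--             seen.add(reason)
--     return deduped[:limit]
-- ===== SOURCE B (Python) =====
-- _RULES = [
--     (["price", "cost", "budget", "fee"],
--      "Buyer is pushing for pricing clarity and value justification."),
--     (["timeline", "time", "launch", "deadline"],
--      "Buyer wants a more concrete implementation timeline."),
--     (["integrat", "crm", "api", "hubspot", "salesforce"],
--      "Buyer needs clearer integration details."),
--     (["security", "privacy", "compliance", "gdpr", "dpdp"],
--      "Buyer wants stronger security and compliance language."),
--     (["onboard", "setup", "train"],
--      "Buyer needs a clearer onboarding and adoption path."),
--     (["support", "help", "success", "sla"],
--      "Buyer is looking for support coverage and escalation clarity."),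
-- ]
-- _TEXTS = [reason for _, reason in _RULES] + [
--     "Buyer question suggests the section should be more specific and outcome-focused."
-- ]
--
--
-- def _category(question):
--     lowered = question.lower()
--     matches = [k for k, (terms, _) in enumerate(_RULES)
--                if any(term in lowered for term in terms)]
--     return min(matches) if matches else len(_RULES)
--
--
-- def _extract_reasons_from_questions(questions: list[str], limit: int = 5) -> list[str]:
--     cats = [_category(q) for q in questions]
--     firsts = sorted(((cats.index(k), k) for k in range(len(_TEXTS)) if k in cats),
--                     key=lambda pair: pair[0])
--     return [_TEXTS[k] for _, k in firsts[:limit]]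
-- ===== Notes on version B (the rewrite author's own statement) =====
-- stated objective: alternative
-- what changed: Instead of classifying each question through the if/elif chain into reason strings and then deduplicating with a seen-set pass, B maps each question to a category number, computes for each of the 7 categories the index of its first occurrence, sorts the occurring categories by that first index and truncates to the limit.
import Mathlib
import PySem

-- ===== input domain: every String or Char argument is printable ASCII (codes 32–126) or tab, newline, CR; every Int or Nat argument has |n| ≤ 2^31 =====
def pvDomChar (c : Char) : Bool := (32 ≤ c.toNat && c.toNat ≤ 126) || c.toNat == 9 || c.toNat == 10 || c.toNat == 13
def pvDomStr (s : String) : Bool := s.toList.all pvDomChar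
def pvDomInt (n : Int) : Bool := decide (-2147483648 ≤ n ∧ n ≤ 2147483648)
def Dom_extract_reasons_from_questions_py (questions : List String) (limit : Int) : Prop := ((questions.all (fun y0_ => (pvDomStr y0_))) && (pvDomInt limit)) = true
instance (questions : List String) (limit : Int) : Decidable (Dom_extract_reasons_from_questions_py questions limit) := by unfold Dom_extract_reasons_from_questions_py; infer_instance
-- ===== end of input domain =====

-- B replaces A's per-question if/elif classification + seen-set dedup pass by a
-- different algorithm: map each question to a category NUMBER, then for each of the 7
-- categories find its FIRST occurrence index, sort the occurring categories by that
-- index and truncate (objective: alternative; same observable result).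

-- ===== PORT A =====
-- literal transliteration: first loop appends a reason per question (if/elif chain),
-- second loop dedupes with a seen set, result is deduped[:limit]
def extract_reasons_from_questions_py (questions : List String) (limit : Int) : List String :=
  let reasons : List String := questions.foldl (fun reasons question =>
    let lowered := PySem.Str.lower question
    if (["price", "cost", "budget", "fee"]).any (fun term => PySem.Str.isIn term lowered) then
      reasons ++ ["Buyer is pushing for pricing clarity and value justification."]
    else if (["timeline", "time", "launch", "deadline"]).any (fun term => PySem.Str.isIn term lowered) then
      reasons ++ ["Buyer wants a more concrete implementation timeline."]
    else if (["integrat", "crm", "api", "hubspot", "salesforce"]).any (fun term => PySem.Str.isIn term lowered) then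
      reasons ++ ["Buyer needs clearer integration details."]
    else if (["security", "privacy", "compliance", "gdpr", "dpdp"]).any (fun term => PySem.Str.isIn term lowered) then
      reasons ++ ["Buyer wants stronger security and compliance language."]
    else if (["onboard", "setup", "train"]).any (fun term => PySem.Str.isIn term lowered) then
      reasons ++ ["Buyer needs a clearer onboarding and adoption path."]
    else if (["support", "help", "success", "sla"]).any (fun term => PySem.Str.isIn term lowered) then
      reasons ++ ["Buyer is looking for support coverage and escalation clarity."]
    else
      reasons ++ ["Buyer question suggests the section should be more specific and outcome-focused."]) []
  let deduped := (reasons.foldl (fun (st : List String × PySem.Set String) reason =>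
    if ¬ (PySem.Set.contains st.2 reason) then (st.1 ++ [reason], PySem.Set.add st.2 reason)
    else st) ([], PySem.Set.empty)).1
  PySem.List.slice deduped none (some limit)

-- ===== PORT B =====
def pvRules : List (List String × String) :=
  [ (["price", "cost", "budget", "fee"],
     "Buyer is pushing for pricing clarity and value justification."),
    (["timeline", "time", "launch", "deadline"],
     "Buyer wants a more concrete implementation timeline."),
    (["integrat", "crm", "api", "hubspot", "salesforce"],
     "Buyer needs clearer integration details."),
    (["security", "privacy", "compliance", "gdpr", "dpdp"],
     "Buyer wants stronger security and compliance language."),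
    (["onboard", "setup", "train"],
     "Buyer needs a clearer onboarding and adoption path."),
    (["support", "help", "success", "sla"],
     "Buyer is looking for support coverage and escalation clarity.") ]

def pvTexts : List String :=
  pvRules.map (fun rule => rule.2) ++
    ["Buyer question suggests the section should be more specific and outcome-focused."]

-- matches = [k for k, (terms, _) in enumerate(_RULES) if any(term in lowered for term in terms)]
-- return min(matches) if matches else len(_RULES)
def pvCategory (question : String) : Int :=
  let lowered := PySem.Str.lower question
  let matched := ((PySem.List.enumerate pvRules 0).filter
    (fun kr => kr.2.1.any (fun term => PySem.Str.isIn term lowered))).map (fun kr => kr.1)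
  match PySem.List.min? matched (fun x => x) with
  | some m => m
  | none => (pvRules.length : Int)

-- _TEXTS[k]; every category index is 0..6, so the index is always in range
def pvTextAt (k : Int) : String := (PySem.List.pyGet? pvTexts k).getD ""

def extract_reasons_from_questions_py_alt (questions : List String) (limit : Int) : List String :=
  let cats := questions.map pvCategory
  let firsts := PySem.List.sorted
    (((PySem.List.pyRange 0 (pvTexts.length : Int) 1).filter (fun k => cats.contains k)).map
      (fun k => ((PySem.List.index? cats k).getD 0, k)))
    (fun pair => pair.1) false
  (PySem.List.slice firsts none (some limit)).map (fun pair => pvTextAt pair.2)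

-- ===== PRECONDITION & SPEC =====
def Spec_extract_reasons_from_questions_py (questions : List String) (limit : Int) (out : List String) : Prop := out = extract_reasons_from_questions_py_alt questions limit
instance (questions : List String) (limit : Int) (out : List String) : Decidable (Spec_extract_reasons_from_questions_py questions limit out) := by unfold Spec_extract_reasons_from_questions_py; infer_instance

-- ===== CLAIM (what is proved, stated in full; the proofs are below) =====
def Claim_equal_extract_reasons_from_questions_py : Prop := ∀ (questions : List String) (limit : Int), Dom_extract_reasons_from_questions_py questions limit → Spec_extract_reasons_from_questions_py questions limit (extract_reasons_from_questions_py questions limit)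

-- ===== LEMMAS AND PROOFS =====

-- A's per-question if/elif chain, named so the proof can talk about it
def pvChain (question : String) : String :=
  let lowered := PySem.Str.lower question
  if (["price", "cost", "budget", "fee"]).any (fun term => PySem.Str.isIn term lowered) then
    "Buyer is pushing for pricing clarity and value justification."
  else if (["timeline", "time", "launch", "deadline"]).any (fun term => PySem.Str.isIn term lowered) then
    "Buyer wants a more concrete implementation timeline."
  else if (["integrat", "crm", "api", "hubspot", "salesforce"]).any (fun term => PySem.Str.isIn term lowered) then
    "Buyer needs clearer integration details."
  else if (["security", "privacy", "compliance", "gdpr", "dpdp"]).any (fun term => PySem.Str.isIn term lowered) then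
    "Buyer wants stronger security and compliance language."
  else if (["onboard", "setup", "train"]).any (fun term => PySem.Str.isIn term lowered) then
    "Buyer needs a clearer onboarding and adoption path."
  else if (["support", "help", "success", "sla"]).any (fun term => PySem.Str.isIn term lowered) then
    "Buyer is looking for support coverage and escalation clarity."
  else
    "Buyer question suggests the section should be more specific and outcome-focused."

-- A's first loop builds exactly the map of pvChain over the questions
theorem pvReasonsA_eq_map (questions : List String) :
    questions.foldl (fun reasons question =>
      let lowered := PySem.Str.lower question
      if (["price", "cost", "budget", "fee"]).any (fun term => PySem.Str.isIn term lowered) then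
        reasons ++ ["Buyer is pushing for pricing clarity and value justification."]
      else if (["timeline", "time", "launch", "deadline"]).any (fun term => PySem.Str.isIn term lowered) then
        reasons ++ ["Buyer wants a more concrete implementation timeline."]
      else if (["integrat", "crm", "api", "hubspot", "salesforce"]).any (fun term => PySem.Str.isIn term lowered) then
        reasons ++ ["Buyer needs clearer integration details."]
      else if (["security", "privacy", "compliance", "gdpr", "dpdp"]).any (fun term => PySem.Str.isIn term lowered) then
        reasons ++ ["Buyer wants stronger security and compliance language."]
      else if (["onboard", "setup", "train"]).any (fun term => PySem.Str.isIn term lowered) then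
        reasons ++ ["Buyer needs a clearer onboarding and adoption path."]
      else if (["support", "help", "success", "sla"]).any (fun term => PySem.Str.isIn term lowered) then
        reasons ++ ["Buyer is looking for support coverage and escalation clarity."]
      else
        reasons ++ ["Buyer question suggests the section should be more specific and outcome-focused."]) []
    = questions.map pvChain := by
  have hfun : (fun (reasons : List String) (question : String) =>
      let lowered := PySem.Str.lower question
      if (["price", "cost", "budget", "fee"]).any (fun term => PySem.Str.isIn term lowered) then
        reasons ++ ["Buyer is pushing for pricing clarity and value justification."]
      else if (["timeline", "time", "launch", "deadline"]).any (fun term => PySem.Str.isIn term lowered) then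
        reasons ++ ["Buyer wants a more concrete implementation timeline."]
      else if (["integrat", "crm", "api", "hubspot", "salesforce"]).any (fun term => PySem.Str.isIn term lowered) then
        reasons ++ ["Buyer needs clearer integration details."]
      else if (["security", "privacy", "compliance", "gdpr", "dpdp"]).any (fun term => PySem.Str.isIn term lowered) then
        reasons ++ ["Buyer wants stronger security and compliance language."]
      else if (["onboard", "setup", "train"]).any (fun term => PySem.Str.isIn term lowered) then
        reasons ++ ["Buyer needs a clearer onboarding and adoption path."]
      else if (["support", "help", "success", "sla"]).any (fun term => PySem.Str.isIn term lowered) then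
        reasons ++ ["Buyer is looking for support coverage and escalation clarity."]
      else
        reasons ++ ["Buyer question suggests the section should be more specific and outcome-focused."])
      = (fun (reasons : List String) (question : String) => reasons ++ [pvChain question]) := by
    funext reasons question
    unfold pvChain
    dsimp only
    split_ifs <;> rfl
  rw [hfun, PySem.List.foldl_append_singleton_eq_map, List.nil_append]

-- A's fused dedup loop keeps its two accumulators equal: it is the Set.add fold
theorem pvDedupLoop (l : List String) (s : List String) :
    l.foldl (fun (st : List String × PySem.Set String) reason =>
      if ¬ (PySem.Set.contains st.2 reason) then (st.1 ++ [reason], PySem.Set.add st.2 reason)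
      else st) (s, s)
    = (l.foldl PySem.Set.add s, l.foldl PySem.Set.add s) := by
  induction l generalizing s with
  | nil => rfl
  | cons x t ih =>
    by_cases hxs : x ∈ s
    · simpa [PySem.Set.add, hxs] using ih s
    · simpa [PySem.Set.add, hxs] using ih (s ++ [x])

-- the chain's string is the text of the category number
theorem pvChain_eq (q : String) : pvChain q = pvTextAt (pvCategory q) := by
  unfold pvChain pvCategory
  cases h0 : (["price", "cost", "budget", "fee"]).any (fun term => PySem.Str.isIn term (PySem.Str.lower q)) <;>
  cases h1 : (["timeline", "time", "launch", "deadline"]).any (fun term => PySem.Str.isIn term (PySem.Str.lower q)) <;>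
  cases h2 : (["integrat", "crm", "api", "hubspot", "salesforce"]).any (fun term => PySem.Str.isIn term (PySem.Str.lower q)) <;>
  cases h3 : (["security", "privacy", "compliance", "gdpr", "dpdp"]).any (fun term => PySem.Str.isIn term (PySem.Str.lower q)) <;>
  cases h4 : (["onboard", "setup", "train"]).any (fun term => PySem.Str.isIn term (PySem.Str.lower q)) <;>
  cases h5 : (["support", "help", "success", "sla"]).any (fun term => PySem.Str.isIn term (PySem.Str.lower q)) <;>
    simp only [pvRules, PySem.List.enumerate, List.filter, h0, h1, h2, h3, h4, h5] <;>
    rfl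

-- every category number is in 0..6
theorem pvCategory_mem (q : String) : 0 ≤ pvCategory q ∧ pvCategory q < 7 := by
  unfold pvCategory
  cases h0 : (["price", "cost", "budget", "fee"]).any (fun term => PySem.Str.isIn term (PySem.Str.lower q)) <;>
  cases h1 : (["timeline", "time", "launch", "deadline"]).any (fun term => PySem.Str.isIn term (PySem.Str.lower q)) <;>
  cases h2 : (["integrat", "crm", "api", "hubspot", "salesforce"]).any (fun term => PySem.Str.isIn term (PySem.Str.lower q)) <;>
  cases h3 : (["security", "privacy", "compliance", "gdpr", "dpdp"]).any (fun term => PySem.Str.isIn term (PySem.Str.lower q)) <;>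
  cases h4 : (["onboard", "setup", "train"]).any (fun term => PySem.Str.isIn term (PySem.Str.lower q)) <;>
  cases h5 : (["support", "help", "success", "sla"]).any (fun term => PySem.Str.isIn term (PySem.Str.lower q)) <;>
    simp only [pvRules, PySem.List.enumerate, List.filter, h0, h1, h2, h3, h4, h5] <;>
    decide

-- the seven reason texts are distinct
theorem pvTextAt_inj (x y : Int) (hx0 : 0 ≤ x) (hx7 : x < 7) (hy0 : 0 ≤ y) (hy7 : y < 7)
    (h : pvTextAt x = pvTextAt y) : x = y := by
  interval_cases x <;> interval_cases y <;> first | rfl | (exfalso; revert h; decide)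

-- PySem dedup (first occurrences) commutes with a map injective on the list
theorem pvFoldAddMap (f : Int → String) (l s : List Int)
    (hinj : ∀ x ∈ l, ∀ y ∈ s ++ l, f x = f y → x = y) :
    (l.map f).foldl PySem.Set.add (s.map f) = (l.foldl PySem.Set.add s).map f := by
  induction l generalizing s with
  | nil => rfl
  | cons x t ih =>
    have hmem : f x ∈ s.map f ↔ x ∈ s := by
      constructor
      · intro hm
        rcases List.mem_map.mp hm with ⟨y, hy, hfy⟩
        have hxy := hinj x (by simp) y (by simp [hy]) hfy.symm
        exact hxy ▸ hy
      · intro h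
        exact List.mem_map_of_mem h
    have hadd : PySem.Set.add (s.map f) (f x) = (PySem.Set.add s x).map f := by
      by_cases h : x ∈ s
      · simp [PySem.Set.add, h, hmem.mpr h]
      · have h2 : f x ∉ s.map f := fun hm => h (hmem.mp hm)
        simp [PySem.Set.add, h, h2]
    simp only [List.map_cons, List.foldl_cons, hadd]
    apply ih
    intro a ha y hy hfa
    refine hinj a (by simp [ha]) y ?_ hfa
    rcases List.mem_append.mp hy with h | h
    · rcases (PySem.Set.mem_add s x y).mp h with h' | h'
      · exact List.mem_append.mpr (Or.inl h')
      · simp [h']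
    · simp [h]

theorem pvDedupMap (f : Int → String) (l : List Int)
    (hinj : ∀ x ∈ l, ∀ y ∈ l, f x = f y → x = y) :
    PySem.List.dedup (l.map f) = (PySem.List.dedup l).map f := by
  simp only [PySem.List.dedup_eq_ofList, PySem.Set.ofList_eq_foldl]
  simpa using pvFoldAddMap f l [] (by simpa using hinj)

-- replace the relation of a Pairwise using only facts about members
theorem pvPairwiseCongr {α : Type} {R S : α → α → Prop} {l : List α}
    (h : l.Pairwise R) (himp : ∀ a ∈ l, ∀ b ∈ l, R a b → S a b) : l.Pairwise S := by
  induction l with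
  | nil => exact List.Pairwise.nil
  | cons x t ih =>
    rcases List.pairwise_cons.mp h with ⟨hx, ht⟩
    exact List.pairwise_cons.mpr
      ⟨fun b hb => himp x (by simp) b (by simp [hb]) (hx b hb),
       ih ht (fun a ha b hb => himp a (by simp [ha]) b (by simp [hb]))⟩

-- dedup lists its elements in order of FIRST occurrence index
theorem pvDedupFirstIdx (l : List Int) :
    (PySem.List.dedup l).Pairwise
      (fun u v => (PySem.List.index? l u).getD 0 < (PySem.List.index? l v).getD 0) := by
  induction l using List.reverseRecOn with
  | nil => simp [PySem.List.dedup_eq_ofList, PySem.Set.ofList_eq_foldl]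
  | append_singleton l x ih =>
    have hded : PySem.List.dedup (l ++ [x]) =
        if x ∈ l then PySem.List.dedup l else PySem.List.dedup l ++ [x] := by
      simp only [PySem.List.dedup_eq_ofList, PySem.Set.ofList_eq_foldl, List.foldl_append,
        List.foldl_cons, List.foldl_nil]
      by_cases hx : x ∈ l
      · have hm : x ∈ l.foldl PySem.Set.add [] := by
          rw [← PySem.Set.ofList_eq_foldl]
          simp [PySem.Set.mem_ofList, hx]
        simp [PySem.Set.add, hm, hx]
      · have hm : x ∉ l.foldl PySem.Set.add [] := by
          rw [← PySem.Set.ofList_eq_foldl]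
          simp [PySem.Set.mem_ofList, hx]
        simp [PySem.Set.add, hm, hx]
    have hmem : ∀ u, u ∈ PySem.List.dedup l → u ∈ l := by
      intro u hu
      exact (PySem.List.mem_dedup _ _).mp hu
    have hidx : ∀ u ∈ l, PySem.List.index? (l ++ [x]) u = PySem.List.index? l u :=
      fun u hu => PySem.List.index?_append_of_mem [x] hu
    by_cases hx : x ∈ l
    · rw [hded, if_pos hx]
      refine pvPairwiseCongr ih ?_
      intro a ha b hb hab
      rw [hidx a (hmem a ha), hidx b (hmem b hb)]
      exact hab
    · rw [hded, if_neg hx]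
      refine List.pairwise_append.mpr ⟨?_, by simp, ?_⟩
      · refine pvPairwiseCongr ih ?_
        intro a ha b hb hab
        rw [hidx a (hmem a ha), hidx b (hmem b hb)]
        exact hab
      · intro a ha b hb
        have hb' : b = x := by simpa using hb
        rw [hb']
        have hax : PySem.List.index? (l ++ [x]) x = some l.length :=
          PySem.List.index?_append_singleton_self l x hx
        have ha' := hmem a ha
        rcases Option.isSome_iff_exists.mp ((PySem.List.index?_isSome_iff _ _).mpr ha') with ⟨k, hk⟩
        rcases PySem.List.getElem_of_index?_eq_some hk with ⟨hklt, _, _⟩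
        rw [hidx a ha', hax, hk]
        simpa using hklt

-- dedup is a permutation of the filtered range, given the category bounds
theorem pvPermRange (cats : List Int) (h : ∀ x ∈ cats, 0 ≤ x ∧ x < 7) :
    (PySem.List.dedup cats).Perm
      ((PySem.List.pyRange 0 (pvTexts.length : Int) 1).filter (fun k => cats.contains k)) := by
  refine (List.perm_ext_iff_of_nodup ?_ ?_).mpr ?_
  · exact PySem.List.nodup_dedup cats
  · exact List.Nodup.filter _ (by decide)
  · intro a
    constructor
    · intro ha
      have ha' : a ∈ cats := (PySem.List.mem_dedup _ _).mp ha
      refine List.mem_filter.mpr ⟨?_, by simpa [List.contains_iff_mem] using ha'⟩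
      have hb := h a ha'
      refine (PySem.List.mem_pyRange_one).mpr ?_
      constructor
      · omega
      · have : (pvTexts.length : Int) = 7 := by decide
        omega
    · intro ha
      rcases List.mem_filter.mp ha with ⟨_, hc⟩
      exact (PySem.List.mem_dedup _ _).mpr (by simpa [List.contains_iff_mem] using hc)

-- slicing xs[:b] commutes with map
theorem pvSliceMap {α β : Type} (f : α → β) (l : List α) (b : Int) :
    PySem.List.slice (l.map f) none (some b) = (PySem.List.slice l none (some b)).map f := by
  by_cases hb : 0 ≤ b
  · rw [PySem.List.slice_to _ hb, PySem.List.slice_to _ hb, List.map_take]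
  · have hk : b = -(((-b).toNat : Nat) : Int) := by omega
    have hkpos : 0 < (-b).toNat := by omega
    rw [hk, PySem.List.slice_to_neg_natCast _ _ hkpos, PySem.List.slice_to_neg_natCast _ _ hkpos,
      List.map_take, List.length_map]

-- ===== VERDICT (by name: the statement is the Claim_ definition above) =====
theorem extract_reasons_from_questions_py_spec : Claim_equal_extract_reasons_from_questions_py := by
  intro questions limit _
  unfold Spec_extract_reasons_from_questions_py
  unfold extract_reasons_from_questions_py extract_reasons_from_questions_py_alt
  simp only [pvReasonsA_eq_map]
  -- name the common data
  set cats := questions.map pvCategory with hcats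
  have hbounds : ∀ x ∈ cats, 0 ≤ x ∧ x < 7 := by
    intro x hx
    rcases List.mem_map.mp hx with ⟨q, _, rfl⟩
    exact pvCategory_mem q
  -- A's side: dedup of the mapped texts
  have hA : (List.foldl (fun (st : List String × PySem.Set String) reason =>
      if ¬ (PySem.Set.contains st.2 reason) then (st.1 ++ [reason], PySem.Set.add st.2 reason)
      else st) ([], PySem.Set.empty) (questions.map pvChain)).1
      = (PySem.List.dedup cats).map pvTextAt := by
    have h1 : questions.map pvChain = cats.map pvTextAt := by
      rw [hcats, List.map_map]
      exact List.map_congr_left (fun q _ => pvChain_eq q)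
    have h2 : ([] : List String) = PySem.Set.empty := rfl
    rw [h1, ← h2, pvDedupLoop]
    have h3 : (cats.map pvTextAt).foldl PySem.Set.add [] = PySem.List.dedup (cats.map pvTextAt) := by
      simp [PySem.List.dedup_eq_ofList, PySem.Set.ofList_eq_foldl]
    dsimp only
    rw [h3]
    exact pvDedupMap pvTextAt cats (fun x hx y hy h =>
      pvTextAt_inj x y (hbounds x hx).1 (hbounds x hx).2 (hbounds y hy).1 (hbounds y hy).2 h)
  -- B's side: the sorted pair list is dedup paired with first indices
  have hsorted : PySem.List.sorted
      (((PySem.List.pyRange 0 (pvTexts.length : Int) 1).filter (fun k => cats.contains k)).map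
        (fun k => ((PySem.List.index? cats k).getD 0, k)))
      (fun pair => pair.1) false
      = (PySem.List.dedup cats).map (fun k => ((PySem.List.index? cats k).getD 0, k)) := by
    refine PySem.List.sorted_eq_of_perm_of_pairwise_lt _ _ _ ?_ ?_
    · exact List.Perm.map _ (pvPermRange cats hbounds)
    · exact List.Pairwise.map _ (fun a b h => h) (pvDedupFirstIdx cats)
  rw [hA, hsorted, pvSliceMap, pvSliceMap, List.map_map]
  rfl
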